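-- pv_equiv track=rewrite | github.com/lucsetzer/prompt_wizard_4 | hook_wizard.py | parse_fallback_hooks
-- ===== SOURCE A (Python) =====
-- def parse_fallback_hooks(ai_response: str) -> list:
--     """Fallback parsing if regex fails"""
--     hooks = []
--     lines = ai_response.split('\n')
--
--     current_hook = {}
--     current_section = None
--
--     for line in lines:
--         line = line.strip()
--         if not line:
--             continue
--
--         if 'hook text' in line.lower() or line.startswith('1.') or line.startswith('2.') or line.startswith('3.'):
--             if current_hook and 'text' in current_hook:
--                 hooks.append(current_hook)
--             current_hook = {'text': line.replace('**Hook Text**:', '').replace('**Hook Text**:', '').strip().strip('"')}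
--         elif 'why it works' in line.lower():
--             current_hook['psychology'] = line.replace('**Why It Works**:', '').replace('**Why It Works**:', '').strip()
--         elif 'visual' in line.lower():
--             current_hook['visual'] = line.replace('**Visual/Execution Tip**:', '').replace('**Visual Tip**:', '').strip()
--
--     # Don't forget the last hook
--     if current_hook and 'text' in current_hook:
--         hooks.append(current_hook)
--
--     # Ensure we have 3 hooks
--     while len(hooks) < 3:
--         hooks.append({
--             'text': f'Hook {len(hooks)+1}: Engaging hook about your topic',
--             'psychology': 'Creates curiosity and engagement',
--             'visual': 'Use text overlay and engaging visuals'
--         })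
--
--     return hooks[:3]  # Return max 3 hooks
-- ===== SOURCE B (Python) =====
-- def parse_fallback_hooks(ai_response: str) -> list:
--     """Fallback parsing: group lines into hook segments, then build each hook dict."""
--     def is_start(l):
--         return 'hook text' in l.lower() or l.startswith(('1.', '2.', '3.'))
--
--     lines = [l for l in (raw.strip() for raw in ai_response.split('\n')) if l]
--
--     # Partition into segments, each headed by a hook-start line; lines before
--     # the first start line are dropped.
--     segments = []
--     for l in lines:
--         if is_start(l):
--             segments.append([l])
--         elif segments:
--             segments[-1].append(l)
--
--     hooks = []
--     for seg in segments[:3]: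
--         hook = {'text': seg[0].replace('**Hook Text**:', '').replace('**Hook Text**:', '').strip().strip('"')}
--         for l in seg[1:]:
--             if 'why it works' in l.lower():
--                 hook['psychology'] = l.replace('**Why It Works**:', '').replace('**Why It Works**:', '').strip()
--             elif 'visual' in l.lower():
--                 hook['visual'] = l.replace('**Visual/Execution Tip**:', '').replace('**Visual Tip**:', '').strip()
--         hooks.append(hook)
--
--     for i in range(len(hooks), 3):
--         hooks.append({
--             'text': f'Hook {i+1}: Engaging hook about your topic',
--             'psychology': 'Creates curiosity and engagement',
--             'visual': 'Use text overlay and engaging visuals'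
--         })
--     return hooks
-- ===== Notes on version B (the rewrite author's own statement) =====
-- stated objective: alternative
-- what changed: Replaces A's single pass with a mutable current-hook dict and flush-on-marker/at-end logic by a two-phase decomposition: first partition the stripped non-empty lines into segments headed by hook-start lines (dropping any prefix before the first marker), then map each of the first three segments independently to its hook dict, and pad with index-based defaults via range instead of a while loop.
import Mathlib
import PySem

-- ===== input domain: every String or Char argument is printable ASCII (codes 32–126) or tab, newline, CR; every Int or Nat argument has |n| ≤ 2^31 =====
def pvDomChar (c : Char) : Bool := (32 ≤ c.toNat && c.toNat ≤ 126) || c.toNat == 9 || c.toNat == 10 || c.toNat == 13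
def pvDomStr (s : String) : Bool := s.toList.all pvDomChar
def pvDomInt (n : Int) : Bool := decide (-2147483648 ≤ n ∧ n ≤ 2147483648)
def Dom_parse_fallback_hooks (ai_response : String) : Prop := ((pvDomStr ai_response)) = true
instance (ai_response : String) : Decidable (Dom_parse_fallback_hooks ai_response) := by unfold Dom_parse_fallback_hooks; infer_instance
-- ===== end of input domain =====

-- B re-implements A's single-pass mutable-dict parser as a two-phase pipeline (partition the
-- stripped non-empty lines into marker-headed segments, then map each segment to its hook dict,
-- padding by index); equal return value on all inputs (neither program mutates anything observable).

-- ===== PORT A =====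
-- shared line classifiers / transforms (identical string operations in both Pythons)
def pvIsStart (l : String) : Bool :=
  PySem.Str.isIn "hook text" (PySem.Str.lower l) || PySem.Str.startswith l "1." ||
    PySem.Str.startswith l "2." || PySem.Str.startswith l "3."

def pvIsPsy (l : String) : Bool := PySem.Str.isIn "why it works" (PySem.Str.lower l)

def pvIsVis (l : String) : Bool := PySem.Str.isIn "visual" (PySem.Str.lower l)

def pvTextOf (l : String) : String :=
  PySem.Str.stripChars
    (PySem.Str.strip (PySem.Str.replace (PySem.Str.replace l "**Hook Text**:" "") "**Hook Text**:" ""))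
    "\""

def pvPsyOf (l : String) : String :=
  PySem.Str.strip (PySem.Str.replace (PySem.Str.replace l "**Why It Works**:" "") "**Why It Works**:" "")

def pvVisOf (l : String) : String :=
  PySem.Str.strip (PySem.Str.replace (PySem.Str.replace l "**Visual/Execution Tip**:" "") "**Visual Tip**:" "")

-- the dict appended by the pad loop (f-string over the 1-based index)
def pvDefaultHook (n : Int) : PySem.Dict String String :=
  PySem.Dict.ofList
    [("text", "Hook " ++ PySem.Int.toStr n ++ ": Engaging hook about your topic"),
     ("psychology", "Creates curiosity and engagement"),
     ("visual", "Use text overlay and engaging visuals")]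

-- A's flush: 'if current_hook and 'text' in current_hook: hooks.append(current_hook)'
-- (this exact two-line fragment appears twice in A: at a marker line and after the loop)
def pvCollect (st : List (PySem.Dict String String) × PySem.Dict String String) :
    List (PySem.Dict String String) :=
  if !st.2.items.isEmpty && st.2.contains "text" then st.1 ++ [st.2] else st.1

-- A's loop body: strip, skip empty, then the three classified branches on (hooks, current_hook)
def pvStepA (st : List (PySem.Dict String String) × PySem.Dict String String) (raw : String) :
    List (PySem.Dict String String) × PySem.Dict String String :=
  let line := PySem.Str.strip raw
  if line = "" then st
  else if pvIsStart line then
    (pvCollect st, PySem.Dict.ofList [("text", pvTextOf line)])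
  else if pvIsPsy line then (st.1, st.2.insert "psychology" (pvPsyOf line))
  else if pvIsVis line then (st.1, st.2.insert "visual" (pvVisOf line))
  else st

-- A's 'while len(hooks) < 3' pad loop
def pvPadA (hooks : List (PySem.Dict String String)) : List (PySem.Dict String String) :=
  if hooks.length < 3 then pvPadA (hooks ++ [pvDefaultHook ((hooks.length : Int) + 1)]) else hooks
termination_by 3 - hooks.length
decreasing_by simp; omega

def parse_fallback_hooks (ai_response : String) : List (List (String × String)) :=
  let lines := (PySem.Str.split? ai_response "\n").getD []   -- sep "\n" ≠ "": split? is always some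
  let st := lines.foldl pvStepA ([], PySem.Dict.empty)
  let hooks := pvCollect st   -- don't forget the last hook
  ((pvPadA hooks).take 3).map (fun d => d.items)

-- ===== PORT B =====
-- B phase 1: partition lines into segments, each headed by a hook-start line
def pvGroupStep (segs : List (List String)) (l : String) : List (List String) :=
  if pvIsStart l then segs ++ [[l]]
  else if segs.isEmpty then segs
  else segs.dropLast ++ [(segs.getLast?.getD []) ++ [l]]

-- B phase 2: one segment → its hook dict
def pvSegIns (d : PySem.Dict String String) (l : String) : PySem.Dict String String :=
  if pvIsPsy l then d.insert "psychology" (pvPsyOf l)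
  else if pvIsVis l then d.insert "visual" (pvVisOf l)
  else d

def pvSegToDict (seg : List String) : PySem.Dict String String :=
  match seg with
  | [] => PySem.Dict.empty   -- unreachable: segments are built non-empty
  | h :: t => t.foldl pvSegIns (PySem.Dict.ofList [("text", pvTextOf h)])

def parse_fallback_hooks_alt (ai_response : String) : List (List (String × String)) :=
  let lines := (((PySem.Str.split? ai_response "\n").getD []).map PySem.Str.strip).filter (fun l => l ≠ "")
  let segs := lines.foldl pvGroupStep []
  let hooks := (segs.take 3).map pvSegToDict
  (hooks ++ (PySem.List.pyRange (hooks.length : Int) 3 1).map (fun i => pvDefaultHook (i + 1))).map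
    (fun d => d.items)

-- ===== PRECONDITION & SPEC =====
def Spec_parse_fallback_hooks (ai_response : String) (out : List (List (String × String))) : Prop := out = parse_fallback_hooks_alt ai_response
instance (ai_response : String) (out : List (List (String × String))) : Decidable (Spec_parse_fallback_hooks ai_response out) := by unfold Spec_parse_fallback_hooks; infer_instance

-- ===== CLAIM (what is proved, stated in full; the proofs are below) =====
def Claim_equal_parse_fallback_hooks : Prop := ∀ (ai_response : String), Dom_parse_fallback_hooks ai_response → Spec_parse_fallback_hooks ai_response (parse_fallback_hooks ai_response)

-- ===== LEMMAS AND PROOFS =====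

theorem pvSegIns_contains_text (t : List String) (d : PySem.Dict String String)
    (h : d.contains "text" = true) : (t.foldl pvSegIns d).contains "text" = true := by
  induction t generalizing d with
  | nil => exact h
  | cons l t ih =>
      apply ih
      simp only [pvSegIns]
      split_ifs <;> simp [PySem.Dict.contains_insert, h]

theorem pvSegToDict_contains_text (h : String) (t : List String) :
    (pvSegToDict (h :: t)).contains "text" = true := by
  apply pvSegIns_contains_text
  rw [show PySem.Dict.ofList [("text", pvTextOf h)] =
      (PySem.Dict.empty.insert "text" (pvTextOf h)) from rfl]
  exact PySem.Dict.contains_insert_self _ _ _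

theorem pvContains_not_isEmpty (d : PySem.Dict String String)
    (h : d.contains "text" = true) : d.items.isEmpty = false := by
  rw [PySem.Dict.contains_iff_mem_keys] at h
  simp only [PySem.Dict.keys] at h
  rcases List.mem_map.mp h with ⟨p, hp, -⟩
  obtain ⟨items⟩ := d
  rcases items with _ | _
  · simp at hp
  · simp

theorem pvSegToDict_append (h : String) (t : List String) (l : String) :
    pvSegToDict ((h :: t) ++ [l]) = pvSegIns (pvSegToDict (h :: t)) l := by
  simp [pvSegToDict, List.foldl_append]

theorem pvGroup_append (ls : List String) (ss segs : List (List String)) (h : segs ≠ []) :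
    ls.foldl pvGroupStep (ss ++ segs) = ss ++ ls.foldl pvGroupStep segs := by
  induction ls generalizing ss segs with
  | nil => simp
  | cons l ls ih =>
      simp only [List.foldl_cons]
      have hne : (ss ++ segs).isEmpty = false := by simp [List.isEmpty_eq_false_iff, h]
      by_cases hs : pvIsStart l = true
      · rw [show pvGroupStep (ss ++ segs) l = ss ++ (segs ++ [[l]]) by
            simp [pvGroupStep, hs],
          show pvGroupStep segs l = segs ++ [[l]] by simp [pvGroupStep, hs]]
        exact ih ss (segs ++ [[l]]) (by simp)
      · obtain ⟨x, hx⟩ := Option.isSome_iff_exists.mp ((List.getLast?_isSome (l := segs)).mpr h)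
        rw [show pvGroupStep (ss ++ segs) l =
              ss ++ (segs.dropLast ++ [(segs.getLast?.getD []) ++ [l]]) by
            simp [pvGroupStep, hs, hne, List.dropLast_append_of_ne_nil h,
              hx, List.append_assoc],
          show pvGroupStep segs l = segs.dropLast ++ [(segs.getLast?.getD []) ++ [l]] by
            simp [pvGroupStep, hs, h]]
        exact ih ss _ (by simp)

-- main invariant, in-segment phase: once a marker line has been seen, A's (hooks, current_hook)
-- state is (hooks, pvSegToDict seg) for the current segment seg, and flushing at the end yields
-- exactly B's grouped segments mapped through pvSegToDict.
theorem pvSeg_inv (raws : List String) (hooks : List (PySem.Dict String String))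
    (h0 : String) (t0 : List String) :
    pvCollect (raws.foldl pvStepA (hooks, pvSegToDict (h0 :: t0))) =
      hooks ++ ((((raws.map PySem.Str.strip).filter (fun l => l ≠ "")).foldl pvGroupStep
        [h0 :: t0]).map pvSegToDict) := by
  induction raws generalizing hooks h0 t0 with
  | nil =>
      simp [pvCollect, pvSegToDict_contains_text,
        pvContains_not_isEmpty _ (pvSegToDict_contains_text h0 t0)]
  | cons raw raws ih =>
      have hct := pvSegToDict_contains_text h0 t0
      have hni := pvContains_not_isEmpty _ hct
      have hflush : pvCollect (hooks, pvSegToDict (h0 :: t0)) = hooks ++ [pvSegToDict (h0 :: t0)] := by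
        simp [pvCollect, hct, hni]
      simp only [List.foldl_cons, List.map_cons]
      by_cases he : PySem.Str.strip raw = ""
      · rw [show pvStepA (hooks, pvSegToDict (h0 :: t0)) raw = (hooks, pvSegToDict (h0 :: t0)) by
          simp [pvStepA, he]]
        rw [List.filter_cons_of_neg (by simp [he])]
        exact ih hooks h0 t0
      · rw [List.filter_cons_of_pos (by simp [he])]
        set l := PySem.Str.strip raw with hl
        have hsd : ∀ x : String, pvSegIns (pvSegToDict (h0 :: t0)) x = pvSegToDict (h0 :: (t0 ++ [x])) := by
          intro x; rw [← List.cons_append, pvSegToDict_append]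
        by_cases hs : pvIsStart l = true
        · rw [show pvStepA (hooks, pvSegToDict (h0 :: t0)) raw =
                (hooks ++ [pvSegToDict (h0 :: t0)], pvSegToDict [l]) by
              rw [show pvSegToDict [l] = PySem.Dict.ofList [("text", pvTextOf l)] from rfl]
              simp [pvStepA, ← hl, he, hs, hflush]]
          rw [List.foldl_cons, show pvGroupStep [h0 :: t0] l = [h0 :: t0] ++ [[l]] by
            simp [pvGroupStep, hs]]
          rw [pvGroup_append _ [h0 :: t0] [[l]] (by simp)]
          simp only [List.map_append, List.map_cons, List.map_nil]
          rw [ih (hooks ++ [pvSegToDict (h0 :: t0)]) l []]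
          simp
        · have hgrp : pvGroupStep [h0 :: t0] l = [h0 :: (t0 ++ [l])] := by
            simp [pvGroupStep, hs]
          have hstep : pvStepA (hooks, pvSegToDict (h0 :: t0)) raw =
              (hooks, pvSegToDict (h0 :: (t0 ++ [l]))) := by
            rw [← hsd l]
            by_cases hp : pvIsPsy l = true
            · simp [pvStepA, ← hl, he, hs, hp, pvSegIns]
            · by_cases hv : pvIsVis l = true
              · simp [pvStepA, ← hl, he, hs, hp, hv, pvSegIns]
              · simp [pvStepA, ← hl, he, hs, hp, hv, pvSegIns]
          rw [hstep, List.foldl_cons, hgrp]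
          exact ih hooks h0 (t0 ++ [l])

-- main invariant, pre-marker phase: before the first marker line A's current_hook never gains a
-- 'text' key and is dropped; B drops those lines because its segment list is still empty.
theorem pvPre_inv (raws : List String) (hooks : List (PySem.Dict String String))
    (cur : PySem.Dict String String) (hc : cur.contains "text" = false) :
    pvCollect (raws.foldl pvStepA (hooks, cur)) =
      hooks ++ ((((raws.map PySem.Str.strip).filter (fun l => l ≠ "")).foldl pvGroupStep
        []).map pvSegToDict) := by
  induction raws generalizing cur with
  | nil => simp [pvCollect, hc]
  | cons raw raws ih =>
      simp only [List.foldl_cons, List.map_cons]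
      by_cases he : PySem.Str.strip raw = ""
      · rw [show pvStepA (hooks, cur) raw = (hooks, cur) by simp [pvStepA, he]]
        rw [List.filter_cons_of_neg (by simp [he])]
        exact ih cur hc
      · rw [List.filter_cons_of_pos (by simp [he])]
        set l := PySem.Str.strip raw with hl
        by_cases hs : pvIsStart l = true
        · rw [show pvStepA (hooks, cur) raw = (hooks, pvSegToDict [l]) by
              rw [show pvSegToDict [l] = PySem.Dict.ofList [("text", pvTextOf l)] from rfl]
              simp [pvStepA, ← hl, he, hs, hc, pvCollect]]
          rw [List.foldl_cons, show pvGroupStep [] l = [[l]] by simp [pvGroupStep, hs]]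
          exact pvSeg_inv raws hooks l []
        · have hgrp : pvGroupStep [] l = [] := by simp [pvGroupStep, hs]
          by_cases hp : pvIsPsy l = true
          · rw [show pvStepA (hooks, cur) raw = (hooks, cur.insert "psychology" (pvPsyOf l)) by
                simp [pvStepA, ← hl, he, hs, hp]]
            rw [List.foldl_cons, hgrp]
            exact ih _ (by simp [PySem.Dict.contains_insert, hc])
          · by_cases hv : pvIsVis l = true
            · rw [show pvStepA (hooks, cur) raw = (hooks, cur.insert "visual" (pvVisOf l)) by
                  simp [pvStepA, ← hl, he, hs, hp, hv]]
              rw [List.foldl_cons, hgrp]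
              exact ih _ (by simp [PySem.Dict.contains_insert, hc])
            · rw [show pvStepA (hooks, cur) raw = (hooks, cur) by
                  simp [pvStepA, ← hl, he, hs, hp, hv]]
              rw [List.foldl_cons, hgrp]
              exact ih cur hc

-- A pads after truncating-at-3; B truncates the segments first and pads by index: same 3 hooks.
theorem pvPad_take (hs : List (PySem.Dict String String)) :
    (pvPadA hs).take 3 =
      hs.take 3 ++ (PySem.List.pyRange (((hs.take 3).length : Nat) : Int) 3 1).map
        (fun i => pvDefaultHook (i + 1)) := by
  match hs with
  | [] =>
      rw [pvPadA]; rw [pvPadA]; rw [pvPadA]; rw [pvPadA]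
      norm_num [PySem.List.pyRange]
      all_goals simp [List.range_succ]
  | [a] =>
      rw [pvPadA]; rw [pvPadA]; rw [pvPadA]
      norm_num [PySem.List.pyRange]
      all_goals simp [List.range_succ]
  | [a, b] =>
      rw [pvPadA]; rw [pvPadA]
      norm_num [PySem.List.pyRange]
  | a :: b :: c :: t =>
      rw [pvPadA, if_neg (by simp)]
      norm_num [PySem.List.pyRange_one_eq_nil]

-- ===== VERDICT (by name: the statement is the Claim_ definition above) =====
theorem parse_fallback_hooks_spec : Claim_equal_parse_fallback_hooks := by
  intro ai_response _
  show parse_fallback_hooks ai_response = parse_fallback_hooks_alt ai_response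
  simp only [parse_fallback_hooks, parse_fallback_hooks_alt]
  rw [pvPre_inv ((PySem.Str.split? ai_response "\n").getD []) [] PySem.Dict.empty
    (by simp [PySem.Dict.contains_empty])]
  rw [List.nil_append, pvPad_take]
  simp [List.map_take]
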